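-- pv_equiv track=rewrite | github.com/laserpointlabs/DocuSenseLM | ontology/ontology.py | get_related_concepts
-- ===== SOURCE A (Python) =====
-- from typing import List, Optional, Dict
--
-- class NDAConceptHierarchy:
--     """Hierarchical organization of NDA concepts"""
--
--     ROOT = "nda"
--
--     STRUCTURE = {
--         "nda": {
--             "parties": ["disclosing_party", "receiving_party"],
--             "clauses": [
--                 "confidentiality",
--                 "exceptions",
--                 "obligations",
--                 "term",
--                 "survival",
--                 "return",
--                 "remedies",
--                 "jurisdiction"
--             ],
--             "metadata": [
--                 "effective_date",
--                 "expiration_date",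
--                 "governing_law",
--                 "mutual_status"
--             ]
--         },
--         "confidentiality": {
--             "scope": ["definition", "covered_information", "exclusions"],
--             "duration": ["term", "survival_period"],
--             "restrictions": ["disclosure", "use", "copying"]
--         },
--         "exceptions": {
--             "public_information": ["publicly_available", "independently_developed"],
--             "legal_requirements": ["court_order", "subpoena"],
--             "consent": ["written_consent", "prior_approval"]
--         },
--         "obligations": {
--             "receiving_party": ["maintain_confidentiality", "use_restrictions", "return_or_destroy"],
--             "disclosing_party": ["mark_as_confidential", "identify_in_writing"]
--         },
--         "term": {
--             "duration": ["months", "years", "indefinite"],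
--             "start_date": ["effective_date", "execution_date"],
--             "end_date": ["expiration_date", "termination_date"]
--         }
--     }
--
-- def get_concept_path(concept: str) -> Optional[List[str]]:
--     """Get the path to a concept in the hierarchy"""
--     def search_in_dict(d: Dict, target: str, path: List[str] = []) -> Optional[List[str]]:
--         for key, value in d.items():
--             current_path = path + [key]
--             if key == target:
--                 return current_path
--             if isinstance(value, dict):
--                 result = search_in_dict(value, target, current_path)
--                 if result:
--                     return result
--             elif isinstance(value, list) and target in value:
--                 return current_path + [target]
--         return None
--
--     return search_in_dict(NDAConceptHierarchy.STRUCTURE, concept)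
--
-- def get_related_concepts(concept: str) -> List[str]:
--     """Get related concepts for a given concept"""
--     path = get_concept_path(concept)
--     if not path:
--         return []
--
--     # Get sibling concepts
--     if len(path) >= 2:
--         parent = path[-2]
--         if parent in NDAConceptHierarchy.STRUCTURE:
--             parent_dict = NDAConceptHierarchy.STRUCTURE[parent]
--             if isinstance(parent_dict, dict):
--                 siblings = []
--                 for key, value in parent_dict.items():
--                     if key != path[-1]:
--                         if isinstance(value, list):
--                             siblings.extend(value)
--                         else:
--                             siblings.append(key)
--                 return siblings
--
--     return []
-- ===== SOURCE B (Python) =====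
-- # Simpler: one ordered scan of the fixed hierarchy, no path reconstruction or parent re-lookup.
-- STRUCTURE = {
--     "nda": {
--         "parties": ["disclosing_party", "receiving_party"],
--         "clauses": [
--             "confidentiality", "exceptions", "obligations", "term",
--             "survival", "return", "remedies", "jurisdiction"
--         ],
--         "metadata": [
--             "effective_date", "expiration_date", "governing_law", "mutual_status"
--         ]
--     },
--     "confidentiality": {
--         "scope": ["definition", "covered_information", "exclusions"],
--         "duration": ["term", "survival_period"],
--         "restrictions": ["disclosure", "use", "copying"]
--     },
--     "exceptions": {
--         "public_information": ["publicly_available", "independently_developed"],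
--         "legal_requirements": ["court_order", "subpoena"],
--         "consent": ["written_consent", "prior_approval"]
--     },
--     "obligations": {
--         "receiving_party": ["maintain_confidentiality", "use_restrictions", "return_or_destroy"],
--         "disclosing_party": ["mark_as_confidential", "identify_in_writing"]
--     },
--     "term": {
--         "duration": ["months", "years", "indefinite"],
--         "start_date": ["effective_date", "execution_date"],
--         "end_date": ["expiration_date", "termination_date"]
--     }
-- }
--
-- def get_related_concepts(concept):
--     for top_key, categories in STRUCTURE.items():
--         if top_key == concept:
--             return []
--         for cat_key, leaves in categories.items():
--             if cat_key == concept: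
--                 return [c for other, lst in categories.items()
--                         if other != concept for c in lst]
--             if concept in leaves:
--                 return []
--     return []
-- ===== Notes on version B (the rewrite author's own statement) =====
-- stated objective: simpler
-- what changed: Replaces the recursive path-finder plus parent re-lookup with a single ordered scan of the fixed hierarchy that returns the sibling lists directly when a category key matches, [] when the concept is hit as a top key or leaf first.
import Mathlib
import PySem

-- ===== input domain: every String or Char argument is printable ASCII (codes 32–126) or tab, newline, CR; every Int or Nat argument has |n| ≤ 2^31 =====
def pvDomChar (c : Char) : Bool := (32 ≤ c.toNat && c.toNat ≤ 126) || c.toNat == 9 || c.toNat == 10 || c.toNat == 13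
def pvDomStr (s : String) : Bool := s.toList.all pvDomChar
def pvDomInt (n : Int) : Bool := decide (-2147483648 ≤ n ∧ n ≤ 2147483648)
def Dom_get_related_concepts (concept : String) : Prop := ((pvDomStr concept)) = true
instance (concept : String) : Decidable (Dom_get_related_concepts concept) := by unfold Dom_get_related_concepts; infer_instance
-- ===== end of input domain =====

-- B replaces A's recursive path-finder + parent re-lookup with one ordered scan (simpler decomposition).

-- ===== PORT A =====
-- the fixed NDA hierarchy: dict of dicts of lists, in insertion order
def pvStructure : List (String × List (String × List String)) :=
  [ ("nda",
      [ ("parties", ["disclosing_party", "receiving_party"]),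
        ("clauses", ["confidentiality", "exceptions", "obligations", "term",
                     "survival", "return", "remedies", "jurisdiction"]),
        ("metadata", ["effective_date", "expiration_date", "governing_law", "mutual_status"]) ]),
    ("confidentiality",
      [ ("scope", ["definition", "covered_information", "exclusions"]),
        ("duration", ["term", "survival_period"]),
        ("restrictions", ["disclosure", "use", "copying"]) ]),
    ("exceptions",
      [ ("public_information", ["publicly_available", "independently_developed"]),
        ("legal_requirements", ["court_order", "subpoena"]),
        ("consent", ["written_consent", "prior_approval"]) ]),
    ("obligations",
      [ ("receiving_party", ["maintain_confidentiality", "use_restrictions", "return_or_destroy"]),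
        ("disclosing_party", ["mark_as_confidential", "identify_in_writing"]) ]),
    ("term",
      [ ("duration", ["months", "years", "indefinite"]),
        ("start_date", ["effective_date", "execution_date"]),
        ("end_date", ["expiration_date", "termination_date"]) ]) ]

-- search_in_dict on an inner dict (values are lists)
def pvSearchInner (d : List (String × List String)) (target : String) (path : List String) :
    Option (List String) :=
  match d with
  | [] => none
  | (k, v) :: rest =>
    if k = target then some (path ++ [k])
    else if target ∈ v then some (path ++ [k] ++ [target])
    else pvSearchInner rest target path

-- search_in_dict on the top dict (values are dicts); `if result:` is exact here since paths are nonempty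
def pvSearchTop (d : List (String × List (String × List String))) (target : String) (path : List String) :
    Option (List String) :=
  match d with
  | [] => none
  | (k, v) :: rest =>
    if k = target then some (path ++ [k])
    else
      match pvSearchInner v target (path ++ [k]) with
      | some r => some r
      | none => pvSearchTop rest target path

def pvGetConceptPath (concept : String) : Option (List String) :=
  pvSearchTop pvStructure concept []

def get_related_concepts (concept : String) : List String :=
  match pvGetConceptPath concept with
  | none => []
  | some path =>
    if 2 ≤ path.length then
      match PySem.List.pyGet? path (-2) with
      | none => []
      | some parent =>
        match List.lookup parent pvStructure with
        | none => []
        | some parentDict =>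
          -- inner values are always lists, so the isinstance(list) branch always extends
          parentDict.foldl
            (fun siblings kv =>
              match PySem.List.pyGet? path (-1) with
              | none => siblings
              | some last => if kv.1 ≠ last then siblings ++ kv.2 else siblings) []
    else []

-- ===== PORT B =====
def pvScanCats (cats : List (String × List String)) (rest : List (String × List String))
    (concept : String) : Option (List String) :=
  match rest with
  | [] => none
  | (catKey, leaves) :: more =>
    if catKey = concept then
      some ((cats.filter (fun p => p.1 ≠ concept)).flatMap (fun p => p.2))
    else if concept ∈ leaves then some []
    else pvScanCats cats more concept

def pvScanTop (d : List (String × List (String × List String))) (concept : String) : List String :=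
  match d with
  | [] => []
  | (topKey, cats) :: rest =>
    if topKey = concept then []
    else
      match pvScanCats cats cats concept with
      | some r => r
      | none => pvScanTop rest concept

def get_related_concepts_alt (concept : String) : List String :=
  pvScanTop pvStructure concept

-- ===== PRECONDITION & SPEC =====
def Spec_get_related_concepts (concept : String) (out : List String) : Prop := out = get_related_concepts_alt concept
instance (concept : String) (out : List String) : Decidable (Spec_get_related_concepts concept out) := by unfold Spec_get_related_concepts; infer_instance

-- ===== CLAIM (what is proved, stated in full; the proofs are below) =====
def Claim_equal_get_related_concepts : Prop := ∀ (concept : String), Dom_get_related_concepts concept → Spec_get_related_concepts concept (get_related_concepts concept)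

-- ===== LEMMAS AND PROOFS =====

-- A's sibling post-processing applied to a found path (the `some path` branch of A's port)
def pvPost (path : List String) : List String :=
  if 2 ≤ path.length then
    match PySem.List.pyGet? path (-2) with
    | none => []
    | some parent =>
      match List.lookup parent pvStructure with
      | none => []
      | some parentDict =>
        parentDict.foldl
          (fun siblings kv =>
            match PySem.List.pyGet? path (-1) with
            | none => siblings
            | some last => if kv.1 ≠ last then siblings ++ kv.2 else siblings) []
  else []

theorem pvA_eq_post (concept : String) :
    get_related_concepts concept =
      (match pvGetConceptPath concept with | none => [] | some p => pvPost p) := by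
  unfold get_related_concepts pvPost
  cases pvGetConceptPath concept <;> rfl

theorem pvFoldl_extend_if {α : Type} (c : String) (acc : List α)
    (l : List (String × List α)) :
    l.foldl (fun s kv => if kv.1 = c then s else s ++ kv.2) acc =
      acc ++ (l.filter (fun p => !decide (p.1 = c))).flatMap (fun p => p.2) := by
  induction l generalizing acc with
  | nil => simp
  | cons hd tl ih =>
    by_cases h : hd.1 = c <;> simp [h, ih, List.append_assoc]

theorem pvPost_pair (t c : String) (cats : List (String × List String))
    (hl : List.lookup t pvStructure = some cats) :
    pvPost [t, c] =
      (cats.filter (fun p => p.1 ≠ c)).flatMap (fun p => p.2) := by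
  unfold pvPost
  simp [PySem.List.pyGet?, PySem.List.pyIdx?, hl, pvFoldl_extend_if]

theorem pvPost_triple (t c x : String)
    (hc : List.lookup c pvStructure = none) :
    pvPost [t, c, x] = [] := by
  unfold pvPost
  simp [PySem.List.pyGet?, PySem.List.pyIdx?, hc]

theorem pvPost_single (t : String) : pvPost [t] = [] := by
  unfold pvPost
  simp

theorem pvInner_eq (t concept : String) (cats : List (String × List String))
    (hl : List.lookup t pvStructure = some cats) :
    ∀ rest : List (String × List String),
      (∀ q ∈ rest, List.lookup q.1 pvStructure = none) →
      (pvSearchInner rest concept [t]).map pvPost = pvScanCats cats rest concept := by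
  intro rest
  induction rest with
  | nil => intro _; rfl
  | cons hd tl ih =>
    intro h
    obtain ⟨c, v⟩ := hd
    have hc : List.lookup c pvStructure = none := h (c, v) (by simp)
    have htl : ∀ q ∈ tl, List.lookup q.1 pvStructure = none := fun q hq => h q (by simp [hq])
    simp only [pvSearchInner, pvScanCats]
    by_cases h1 : c = concept
    · subst h1
      simp [pvPost_pair t c cats hl]
    · simp only [if_neg h1]
      by_cases h2 : concept ∈ v
      · simp [h2, pvPost_triple t c concept hc]
      · simp [h2, ih htl]

theorem pvTop_eq (concept : String) :
    ∀ d : List (String × List (String × List String)),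
      (∀ p ∈ d, List.lookup p.1 pvStructure = some p.2 ∧
        ∀ q ∈ p.2, List.lookup q.1 pvStructure = none) →
      (match pvSearchTop d concept [] with | none => [] | some p => pvPost p) =
        pvScanTop d concept := by
  intro d
  induction d with
  | nil => intro _; rfl
  | cons hd tl ih =>
    intro h
    obtain ⟨t, cats⟩ := hd
    have ht := h (t, cats) (by simp)
    have htl : ∀ p ∈ tl, List.lookup p.1 pvStructure = some p.2 ∧
        ∀ q ∈ p.2, List.lookup q.1 pvStructure = none := fun p hp => h p (by simp [hp])
    simp only [pvSearchTop, pvScanTop]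
    by_cases h1 : t = concept
    · simp [h1, pvPost_single]
    · simp only [if_neg h1]
      have hin := pvInner_eq t concept cats ht.1 cats ht.2
      cases hfound : pvSearchInner cats concept [t] with
      | some r =>
        rw [hfound] at hin
        simp only [List.nil_append, hfound, Option.map_some] at hin ⊢
        rw [← hin]
      | none =>
        rw [hfound] at hin
        simp only [List.nil_append, hfound, Option.map_none] at hin ⊢
        rw [← hin, ih htl]

-- ===== VERDICT (by name: the statement is the Claim_ definition above) =====
theorem get_related_concepts_spec : Claim_equal_get_related_concepts := by
  intro concept _
  unfold Spec_get_related_concepts get_related_concepts_alt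
  rw [pvA_eq_post]
  exact pvTop_eq concept pvStructure (by decide)
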